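-- pv_equiv track=rewrite | github.com/antoniprzybylik/tacotron2-tools | tacotron2/text_pl/rewrite.py | reduceRepeat
-- ===== SOURCE A (Python) =====
-- def reduceRepeat(word):
--     splitted = list(word)
--
--     prev = ""
--     reduced = []
--     for letter in splitted:
--         reduced.append(letter if letter != prev else "•")
--         prev = letter
--
--     return ''.join(reduced)
-- ===== SOURCE B (Python) =====
-- def reduceRepeat(word):
--     # run-based: scan maximal runs of equal characters, emit char + bullets
--     out = []
--     i = 0
--     n = len(word)
--     while i < n:
--         c = word[i]
--         j = i + 1
--         while j < n and word[j] == c: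
--             j += 1
--         out.append(c + "•" * (j - i - 1))
--         i = j
--     return ''.join(out)
-- ===== Notes on version B (the rewrite author's own statement) =====
-- stated objective: alternative
-- what changed: Replaced the previous-character-tracking per-letter loop with a run-based scan: an outer loop finds each maximal run of equal characters and emits the character followed by one bullet per extra occurrence.
import Mathlib
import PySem

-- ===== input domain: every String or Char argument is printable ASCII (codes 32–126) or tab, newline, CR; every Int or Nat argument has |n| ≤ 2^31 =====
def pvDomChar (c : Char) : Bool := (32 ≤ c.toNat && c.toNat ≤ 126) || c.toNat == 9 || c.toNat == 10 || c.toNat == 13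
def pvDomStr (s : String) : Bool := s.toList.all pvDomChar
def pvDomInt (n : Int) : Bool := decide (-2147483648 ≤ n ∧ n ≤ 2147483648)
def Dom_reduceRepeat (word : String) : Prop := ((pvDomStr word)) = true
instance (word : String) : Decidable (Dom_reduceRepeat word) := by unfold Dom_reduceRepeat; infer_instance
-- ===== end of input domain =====

-- B replaces A's previous-character-tracking pass by a run-based scan over maximal
-- runs of equal characters (objective: alternative decomposition, same O(n) cost).

-- ===== PORT A =====
-- prev starts as "" in Python, which equals no single character: Option Char, none initially.
def reduceRepeatGoA (prev : Option Char) (l : List Char) : List Char :=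
  match l with
  | [] => []
  | c :: rest => (if some c = prev then '•' else c) :: reduceRepeatGoA (some c) rest

def reduceRepeat (word : String) : String :=
  String.ofList (reduceRepeatGoA none word.toList)

-- ===== PORT B =====
-- each step consumes one maximal run: its head, then one bullet per remaining member.
def reduceRepeatGoB (l : List Char) : List Char :=
  match l with
  | [] => []
  | c :: rest =>
      c :: (List.replicate (rest.takeWhile (· == c)).length '•'
            ++ reduceRepeatGoB (rest.dropWhile (· == c)))
termination_by l.length
decreasing_by
  simp only [List.length_cons]
  exact Nat.lt_succ_of_le (List.length_dropWhile_le _ _)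

def reduceRepeat_alt (word : String) : String :=
  String.ofList (reduceRepeatGoB word.toList)

-- ===== PRECONDITION & SPEC =====
def Spec_reduceRepeat (word : String) (out : String) : Prop := out = reduceRepeat_alt word
instance (word : String) (out : String) : Decidable (Spec_reduceRepeat word out) := by unfold Spec_reduceRepeat; infer_instance

-- ===== CLAIM (what is proved, stated in full; the proofs are below) =====
def Claim_equal_reduceRepeat : Prop := ∀ (word : String), Dom_reduceRepeat word → Spec_reduceRepeat word (reduceRepeat word)

-- ===== LEMMAS AND PROOFS =====

-- within a run of c's, A emits one bullet per character
theorem goA_run (c : Char) (rest : List Char) :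
    reduceRepeatGoA (some c) rest =
      List.replicate (rest.takeWhile (· == c)).length '•'
        ++ reduceRepeatGoA (some c) (rest.dropWhile (· == c)) := by
  induction rest with
  | nil => simp [reduceRepeatGoA]
  | cons d r ih =>
    by_cases h : d = c
    · subst h
      simp only [List.takeWhile_cons, List.dropWhile_cons, beq_self_eq_true, if_true]
      simp [reduceRepeatGoA, List.replicate_succ, ih]
    · have hb : (d == c) = false := beq_false_of_ne h
      simp [hb]

-- main: when prev does not match the head, A agrees with B's run scan
theorem goA_eq_goB_aux (n : Nat) :
    ∀ l : List Char, l.length ≤ n → ∀ prev : Option Char,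
      (∀ c, l.head? = some c → prev ≠ some c) →
      reduceRepeatGoA prev l = reduceRepeatGoB l := by
  induction n with
  | zero =>
    intro l hl prev _
    have : l = [] := List.eq_nil_of_length_eq_zero (Nat.le_zero.mp hl)
    subst this; simp [reduceRepeatGoA, reduceRepeatGoB]
  | succ n ih =>
    intro l hl prev h
    match l with
    | [] => simp [reduceRepeatGoA, reduceRepeatGoB]
    | c :: rest =>
      have hne : prev ≠ some c := h c rfl
      have hif : (if some c = prev then '•' else c) = c := by
        rw [if_neg (fun hc => hne hc.symm)]
      rw [reduceRepeatGoB]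
      show (if some c = prev then '•' else c) :: reduceRepeatGoA (some c) rest = _
      rw [hif, goA_run]
      congr 1
      congr 1
      apply ih
      · exact Nat.le_trans (List.length_dropWhile_le _ _)
          (Nat.le_of_succ_le_succ hl)
      · intro d hd hcd
        injection hcd with hcd
        subst hcd
        have hhd := List.head?_dropWhile_not (p := (· == c)) rest
        rw [hd] at hhd
        simp at hhd

theorem reduceRepeat_spec : Claim_equal_reduceRepeat := by
  intro word _
  unfold Spec_reduceRepeat reduceRepeat reduceRepeat_alt
  congr 1
  exact goA_eq_goB_aux word.toList.length word.toList (Nat.le_refl _) none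
    (fun c _ h => by simp at h)
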